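-- pv_equiv track=rewrite | github.com/brookyale0512/ClinicDx- | training/cds-lora/data_loader.py | _mask_labels
-- ===== SOURCE A (Python) =====
-- from typing import List, Dict, Any, Optional
--
-- def _mask_labels(input_ids: List[int], user_pat: List[int], model_pat: List[int],
--                   system_pat: List[int] = None) -> List[int]:
--     """Set labels=-100 for all tokens in user/system turns and BOS.
--
--     Walks through the token sequence and tracks whether we're inside a
--     user/system turn or a model turn. All tokens in user and system turns
--     (including the <start_of_turn>user/system marker) are masked.
--     Model turn tokens (reasoning, KB queries, final answers) keep their
--     original label.
--     """
--     labels = list(input_ids)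
--     in_masked = False
--     ulen = len(user_pat)
--     mlen = len(model_pat)
--     slen = len(system_pat) if system_pat else 0
--     n = len(labels)
--
--     i = 0
--     while i < n:
--         if i + ulen <= n and input_ids[i : i + ulen] == user_pat:
--             in_masked = True
--         elif system_pat and i + slen <= n and input_ids[i : i + slen] == system_pat:
--             in_masked = True
--         elif i + mlen <= n and input_ids[i : i + mlen] == model_pat:
--             in_masked = False
--         if in_masked:
--             labels[i] = -100
--         i += 1
--
--     if labels:
--         labels[0] = -100
--     return labels
-- ===== SOURCE B (Python) =====
-- def _mask_labels(input_ids, user_pat, model_pat, system_pat=None):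
--     """Event-list re-implementation: collect every pattern-start position once,
--     then emit the output segment by segment between consecutive events."""
--     n = len(input_ids)
--
--     def starts(pat):
--         m = len(pat)
--         return [i for i in range(n) if i + m <= n and input_ids[i:i + m] == pat]
--
--     mask_events = set(starts(user_pat))
--     if system_pat:
--         mask_events |= set(starts(system_pat))
--     events = sorted(mask_events | set(starts(model_pat)))
--
--     res = list(input_ids[:events[0]]) if events else list(input_ids)
--     for p, q in zip(events, events[1:] + [n]):
--         if p in mask_events:
--             res += [-100] * (q - p)
--         else:
--             res += list(input_ids[p:q])
--     if res:
--         res[0] = -100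
--     return res
-- ===== Notes on version B (the rewrite author's own statement) =====
-- stated objective: alternative
-- what changed: A walks token by token carrying an in_masked flag and writing -100 per position; B first collects the start positions of all three patterns into event sets, sorts them into one event list, and then builds the output segment by segment between consecutive events, filling whole masked ranges at once.
import Mathlib
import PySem

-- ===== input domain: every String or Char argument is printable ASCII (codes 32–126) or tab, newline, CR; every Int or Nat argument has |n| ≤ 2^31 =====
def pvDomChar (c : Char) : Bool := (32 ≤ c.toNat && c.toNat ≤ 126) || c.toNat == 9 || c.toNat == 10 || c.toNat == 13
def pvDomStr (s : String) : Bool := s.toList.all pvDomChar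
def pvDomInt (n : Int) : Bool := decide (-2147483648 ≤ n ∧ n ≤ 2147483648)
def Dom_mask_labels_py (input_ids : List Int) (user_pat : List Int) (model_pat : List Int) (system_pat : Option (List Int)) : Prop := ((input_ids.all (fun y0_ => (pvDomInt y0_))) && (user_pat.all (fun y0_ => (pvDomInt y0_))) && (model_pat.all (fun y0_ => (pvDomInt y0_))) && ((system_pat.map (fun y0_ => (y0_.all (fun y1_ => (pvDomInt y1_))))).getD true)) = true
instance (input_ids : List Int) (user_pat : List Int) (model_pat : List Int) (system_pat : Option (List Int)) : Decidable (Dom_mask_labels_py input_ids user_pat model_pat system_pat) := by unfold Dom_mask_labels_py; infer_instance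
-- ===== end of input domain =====

-- B replaces A's per-token state-machine walk by an event list (all pattern start
-- positions, found once) and segment-by-segment output construction; objective:
-- alternative decomposition, same asymptotic cost.

-- ===== PORT A =====
-- literal transliteration of A's while-loop: state (labels, in_masked), one step per index
def mask_labels_py (input_ids : List Int) (user_pat : List Int) (model_pat : List Int) (system_pat : Option (List Int)) : List Int :=
  let ulen := user_pat.length
  let mlen := model_pat.length
  let sysT : Bool := match system_pat with | some l => !l.isEmpty | none => false
  let spat := system_pat.getD []
  let slen := if sysT then spat.length else 0
  let n := input_ids.length
  let r := (List.range n).foldl (fun (st : List Int × Bool) i =>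
      let in_masked :=
        if i + ulen ≤ n ∧ PySem.List.slice input_ids (some (i : Int)) (some ((i : Int) + (ulen : Int))) = user_pat then true
        else if sysT = true ∧ i + slen ≤ n ∧ PySem.List.slice input_ids (some (i : Int)) (some ((i : Int) + (slen : Int))) = spat then true
        else if i + mlen ≤ n ∧ PySem.List.slice input_ids (some (i : Int)) (some ((i : Int) + (mlen : Int))) = model_pat then false
        else st.2
      (if in_masked then st.1.set i (-100) else st.1, in_masked))
    (input_ids, false)
  if r.1.isEmpty then r.1 else r.1.set 0 (-100)

-- ===== PORT B =====
-- start positions of pat inside input_ids (B's helper 'starts')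
def pvStartsB (input_ids pat : List Int) : List Nat :=
  (List.range input_ids.length).filter
    (fun i => decide (i + pat.length ≤ input_ids.length) &&
      (PySem.List.slice input_ids (some (i : Int)) (some ((i : Int) + (pat.length : Int))) == pat))

def mask_labels_py_alt (input_ids : List Int) (user_pat : List Int) (model_pat : List Int) (system_pat : Option (List Int)) : List Int :=
  let n := input_ids.length
  let mask0 : PySem.Set Nat := PySem.Set.ofList (pvStartsB input_ids user_pat)
  let maskE : PySem.Set Nat := match system_pat with
    | some l => if !l.isEmpty then PySem.Set.union mask0 (pvStartsB input_ids l) else mask0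
    | none => mask0
  let events := PySem.List.sorted (PySem.Set.union maskE (pvStartsB input_ids model_pat)) (fun x => x) false
  let res0 := match events with
    | [] => input_ids
    | p :: _ => input_ids.take p          -- input_ids[:events[0]]
  let res := (events.zip (events.tail ++ [n])).foldl (fun res pq =>
      if PySem.Set.contains maskE pq.1 then res ++ List.replicate (pq.2 - pq.1) (-100)
      else res ++ (input_ids.drop pq.1).take (pq.2 - pq.1))    -- input_ids[p:q]
    res0
  if res.isEmpty then res else res.set 0 (-100)

-- ===== PRECONDITION & SPEC =====
def Spec_mask_labels_py (input_ids : List Int) (user_pat : List Int) (model_pat : List Int) (system_pat : Option (List Int)) (out : List Int) : Prop := out = mask_labels_py_alt input_ids user_pat model_pat system_pat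
instance (input_ids : List Int) (user_pat : List Int) (model_pat : List Int) (system_pat : Option (List Int)) (out : List Int) : Decidable (Spec_mask_labels_py input_ids user_pat model_pat system_pat out) := by unfold Spec_mask_labels_py; infer_instance

-- ===== CLAIM (what is proved, stated in full; the proofs are below) =====
def Claim_equal_mask_labels_py : Prop := ∀ (input_ids : List Int) (user_pat : List Int) (model_pat : List Int) (system_pat : Option (List Int)), Dom_mask_labels_py input_ids user_pat model_pat system_pat → Spec_mask_labels_py input_ids user_pat model_pat system_pat (mask_labels_py input_ids user_pat model_pat system_pat)

-- ===== LEMMAS AND PROOFS =====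

-- the "event" at position i: some true = a user/system turn starts, some false = a model turn starts
def pvEv (input_ids user_pat model_pat : List Int) (system_pat : Option (List Int)) (i : Nat) : Option Bool :=
  let n := input_ids.length
  let sysT : Bool := match system_pat with | some l => !l.isEmpty | none => false
  let spat := system_pat.getD []
  let slen := if sysT then spat.length else 0
  if i + user_pat.length ≤ n ∧ PySem.List.slice input_ids (some (i : Int)) (some ((i : Int) + (user_pat.length : Int))) = user_pat then some true
  else if sysT = true ∧ i + slen ≤ n ∧ PySem.List.slice input_ids (some (i : Int)) (some ((i : Int) + (slen : Int))) = spat then some true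
  else if i + model_pat.length ≤ n ∧ PySem.List.slice input_ids (some (i : Int)) (some ((i : Int) + (model_pat.length : Int))) = model_pat then some false
  else none

-- masked state after processing position i
def pvM (ev : Nat → Option Bool) : Nat → Bool
  | 0 => (ev 0).getD false
  | (i+1) => (ev (i+1)).getD (pvM ev i)

-- the value the final labels list holds at position j (before the labels[0] = -100 override)
def pvTarget (ev : Nat → Option Bool) (xs : List Int) (j : Nat) : Int :=
  if pvM ev j then -100 else xs.getD j 0

theorem pvM_of_some (ev : Nat → Option Bool) (i : Nat) (b : Bool) (h : ev i = some b) :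
    pvM ev i = b := by cases i <;> simp [pvM, h]

theorem pvM_of_none (ev : Nat → Option Bool) (i : Nat) (h : ev (i+1) = none) :
    pvM ev (i+1) = pvM ev i := by simp [pvM, h]

theorem pvM_false_of_none_below (ev : Nat → Option Bool) (j : Nat)
    (h : ∀ t, t ≤ j → ev t = none) : pvM ev j = false := by
  induction j with
  | zero => simp [pvM, h 0 (by omega)]
  | succ k ih =>
    rw [pvM_of_none ev k (h _ (by omega))]
    exact ih (fun t ht => h t (by omega))

theorem pvM_const_seg (ev : Nat → Option Bool) (p j : Nat) (hpj : p ≤ j)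
    (h : ∀ t, p < t → t ≤ j → ev t = none) : pvM ev j = pvM ev p := by
  induction j with
  | zero =>
    have hp : p = 0 := Nat.le_zero.mp hpj
    subst hp; rfl
  | succ k ih =>
    rcases Nat.eq_or_lt_of_le hpj with h1 | h1
    · rw [h1]
    · rw [pvM_of_none ev k (h _ (by omega) (by omega))]
      exact ih (by omega) (fun t ht1 ht2 => h t ht1 (by omega))

theorem pv_map_getD_range (xs : List Int) :
    (List.range xs.length).map (fun j => xs.getD j 0) = xs := by
  apply List.ext_getElem
  · simp
  · intro i h1 h2
    simp [List.getD_eq_getElem?_getD, List.getElem?_eq_getElem h2]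

theorem pv_map_getD_range_take (xs : List Int) (p : Nat) (hp : p ≤ xs.length) :
    (List.range p).map (fun j => xs.getD j 0) = xs.take p := by
  apply List.ext_getElem
  · simp; omega
  · intro i h1 h2
    have hi : i < p := by simpa using h1
    have hix : i < xs.length := by omega
    simp [List.getD_eq_getElem?_getD, List.getElem?_eq_getElem hix]

theorem pvStepA (input_ids user_pat model_pat : List Int) (system_pat : Option (List Int)) (st : List Int × Bool) (i : Nat) :
    ((if (if i + user_pat.length ≤ input_ids.length ∧ PySem.List.slice input_ids (some (i : Int)) (some ((i : Int) + (user_pat.length : Int))) = user_pat then true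
        else if (match system_pat with | some l => !l.isEmpty | none => false) = true ∧ i + (if (match system_pat with | some l => !l.isEmpty | none => false) then (system_pat.getD []).length else 0) ≤ input_ids.length ∧ PySem.List.slice input_ids (some (i : Int)) (some ((i : Int) + (Nat.cast (if (match system_pat with | some l => !l.isEmpty | none => false) then (system_pat.getD []).length else 0) : Int))) = system_pat.getD [] then true
        else if i + model_pat.length ≤ input_ids.length ∧ PySem.List.slice input_ids (some (i : Int)) (some ((i : Int) + (model_pat.length : Int))) = model_pat then false
        else st.2) then st.1.set i (-100) else st.1, (if i + user_pat.length ≤ input_ids.length ∧ PySem.List.slice input_ids (some (i : Int)) (some ((i : Int) + (user_pat.length : Int))) = user_pat then true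
        else if (match system_pat with | some l => !l.isEmpty | none => false) = true ∧ i + (if (match system_pat with | some l => !l.isEmpty | none => false) then (system_pat.getD []).length else 0) ≤ input_ids.length ∧ PySem.List.slice input_ids (some (i : Int)) (some ((i : Int) + (Nat.cast (if (match system_pat with | some l => !l.isEmpty | none => false) then (system_pat.getD []).length else 0) : Int))) = system_pat.getD [] then true
        else if i + model_pat.length ≤ input_ids.length ∧ PySem.List.slice input_ids (some (i : Int)) (some ((i : Int) + (model_pat.length : Int))) = model_pat then false
        else st.2)) : List Int × Bool)
    = (if (pvEv input_ids user_pat model_pat system_pat i).getD st.2 then st.1.set i (-100) else st.1,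
       (pvEv input_ids user_pat model_pat system_pat i).getD st.2) := by
  have hval : (if i + user_pat.length ≤ input_ids.length ∧ PySem.List.slice input_ids (some (i : Int)) (some ((i : Int) + (user_pat.length : Int))) = user_pat then true
        else if (match system_pat with | some l => !l.isEmpty | none => false) = true ∧ i + (if (match system_pat with | some l => !l.isEmpty | none => false) then (system_pat.getD []).length else 0) ≤ input_ids.length ∧ PySem.List.slice input_ids (some (i : Int)) (some ((i : Int) + (Nat.cast (if (match system_pat with | some l => !l.isEmpty | none => false) then (system_pat.getD []).length else 0) : Int))) = system_pat.getD [] then true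
        else if i + model_pat.length ≤ input_ids.length ∧ PySem.List.slice input_ids (some (i : Int)) (some ((i : Int) + (model_pat.length : Int))) = model_pat then false
        else st.2) = (pvEv input_ids user_pat model_pat system_pat i).getD st.2 := by
    simp only [pvEv]
    split_ifs <;> simp_all
  rw [hval]

-- A's loop computes, after k steps, the first k target values and the state pvM (k-1)
theorem pvA_fold (input_ids user_pat model_pat : List Int) (system_pat : Option (List Int)) :
    ∀ k, k ≤ input_ids.length →
    (List.range k).foldl (fun (st : List Int × Bool) i =>
      ((if (if i + user_pat.length ≤ input_ids.length ∧ PySem.List.slice input_ids (some (i : Int)) (some ((i : Int) + (user_pat.length : Int))) = user_pat then true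
        else if (match system_pat with | some l => !l.isEmpty | none => false) = true ∧ i + (if (match system_pat with | some l => !l.isEmpty | none => false) then (system_pat.getD []).length else 0) ≤ input_ids.length ∧ PySem.List.slice input_ids (some (i : Int)) (some ((i : Int) + (Nat.cast (if (match system_pat with | some l => !l.isEmpty | none => false) then (system_pat.getD []).length else 0) : Int))) = system_pat.getD [] then true
        else if i + model_pat.length ≤ input_ids.length ∧ PySem.List.slice input_ids (some (i : Int)) (some ((i : Int) + (model_pat.length : Int))) = model_pat then false
        else st.2) then st.1.set i (-100) else st.1, (if i + user_pat.length ≤ input_ids.length ∧ PySem.List.slice input_ids (some (i : Int)) (some ((i : Int) + (user_pat.length : Int))) = user_pat then true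
        else if (match system_pat with | some l => !l.isEmpty | none => false) = true ∧ i + (if (match system_pat with | some l => !l.isEmpty | none => false) then (system_pat.getD []).length else 0) ≤ input_ids.length ∧ PySem.List.slice input_ids (some (i : Int)) (some ((i : Int) + (Nat.cast (if (match system_pat with | some l => !l.isEmpty | none => false) then (system_pat.getD []).length else 0) : Int))) = system_pat.getD [] then true
        else if i + model_pat.length ≤ input_ids.length ∧ PySem.List.slice input_ids (some (i : Int)) (some ((i : Int) + (model_pat.length : Int))) = model_pat then false
        else st.2)) : List Int × Bool))
      (input_ids, false)
    = ((List.range input_ids.length).map (fun j =>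
         if j < k then pvTarget (pvEv input_ids user_pat model_pat system_pat) input_ids j
         else input_ids.getD j 0),
       if k = 0 then false else pvM (pvEv input_ids user_pat model_pat system_pat) (k-1)) := by
  intro k
  induction k with
  | zero =>
    intro _
    simp only [List.range_zero, List.foldl_nil, Nat.not_lt_zero, if_false]
    rw [pv_map_getD_range]
    simp
  | succ k ih =>
    intro hk
    rw [List.range_succ, List.foldl_append, ih (by omega), List.foldl_cons, List.foldl_nil]
    refine Eq.trans (pvStepA input_ids user_pat model_pat system_pat _ k) ?_
    dsimp only
    set ev := pvEv input_ids user_pat model_pat system_pat with hev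
    have h2 : (ev k).getD (if k = 0 then false else pvM ev (k-1)) = pvM ev k := by
      cases k with
      | zero => rfl
      | succ j => simp [pvM]
    rw [h2]
    have hn : k + 1 ≠ 0 := by omega
    simp only [hn, if_false, Nat.add_sub_cancel]
    congr 1
    by_cases hm : pvM ev k = true
    · rw [if_pos hm]
      apply List.ext_getElem
      · simp
      · intro i h1 h2'
        have hi : i < input_ids.length := by simpa using h1
        simp only [List.getElem_set, List.getElem_map, List.getElem_range]
        by_cases hik : k = i
        · subst hik
          simp [pvTarget, hm]
        · rw [if_neg hik]
          by_cases hlt : i < k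
          · simp [hlt, Nat.lt_succ_of_lt hlt]
          · have : ¬ i < k + 1 := by omega
            simp [hlt, this]
    · rw [if_neg hm]
      apply List.map_congr_left
      intro j _
      by_cases hlt : j < k
      · simp [hlt, Nat.lt_succ_of_lt hlt]
      · by_cases hjk : j = k
        · subst hjk
          simp only [Nat.lt_succ_self, if_pos, lt_irrefl, pvTarget]
          simp at hm
          simp [hm]
        · have h3 : ¬ j < k + 1 := by omega
          simp [hlt, h3]

-- one segment of B's output: from an event at p up to the next event (or the end) at q
theorem pvB_seg (xs : List Int) (ev : Nat → Option Bool) (maskE : List Nat)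
    (hmask : ∀ i, i < xs.length → (PySem.Set.contains maskE i = true ↔ ev i = some true))
    (p q : Nat) (hpq : p < q) (hq : q ≤ xs.length)
    (hb : (ev p).isSome = true)
    (hnone : ∀ t, p < t → t < q → ev t = none)
    (acc : List Int) (hacc : acc = (List.range p).map (pvTarget ev xs)) :
    (if PySem.Set.contains maskE p then acc ++ List.replicate (q - p) (-100)
     else acc ++ (xs.drop p).take (q - p)) = (List.range q).map (pvTarget ev xs) := by
  have hplen : p < xs.length := by omega
  obtain ⟨b, hbv⟩ := Option.isSome_iff_exists.mp hb
  have hMp : pvM ev p = b := pvM_of_some ev p b hbv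
  have hMj : ∀ t, t < q - p → pvM ev (p + t) = b := by
    intro t ht
    rw [pvM_const_seg ev p (p + t) (by omega) (fun s hs1 hs2 => hnone s hs1 (by omega)), hMp]
  have hrange : List.range q = List.range p ++ (List.range (q - p)).map (fun t => p + t) := by
    rw [← List.range_add]
    congr 1
    omega
  rw [hrange, List.map_append, List.map_map, ← hacc]
  by_cases hc : PySem.Set.contains maskE p = true
  · rw [if_pos hc]
    have hbt : b = true := by
      have h := (hmask p hplen).mp hc
      rw [hbv] at h
      exact Option.some_inj.mp h
    congr 1
    symm
    rw [List.eq_replicate_iff]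
    refine ⟨by simp, ?_⟩
    intro x hx
    simp only [List.mem_map, List.mem_range, Function.comp_apply] at hx
    obtain ⟨t, ht, hxv⟩ := hx
    rw [← hxv]
    simp [pvTarget, hMj t ht, hbt]
  · rw [if_neg hc]
    have hbf : b = false := by
      cases b
      · rfl
      · exact absurd ((hmask p hplen).mpr hbv) hc
    congr 1
    have hcg : ∀ t ∈ List.range (q - p), (pvTarget ev xs ∘ (fun t => p + t)) t = xs.getD (p + t) 0 := by
      intro t ht
      simp only [List.mem_range] at ht
      simp [pvTarget, hMj t ht, hbf]
    rw [List.map_congr_left hcg]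
    apply List.ext_getElem
    · simp
      omega
    · intro i h1 h2'
      have hi : i < q - p := by simp at h1; omega
      have hpi : p + i < xs.length := by omega
      rw [List.getElem_take, List.getElem_drop]
      simp [List.getD_eq_getElem?_getD, List.getElem?_eq_getElem hpi]

theorem pvB_fold (xs : List Int) (ev : Nat → Option Bool) (maskE : List Nat)
    (hmask : ∀ i, i < xs.length → (PySem.Set.contains maskE i = true ↔ ev i = some true)) :
    ∀ (E : List Nat) (p : Nat) (acc : List Int),
    (p :: E).Pairwise (· < ·) →
    (∀ e ∈ p :: E, e < xs.length) →
    (∀ i, p ≤ i → i < xs.length → ((ev i).isSome = true ↔ i ∈ p :: E)) →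
    acc = (List.range p).map (pvTarget ev xs) →
    ((p :: E).zip (E ++ [xs.length])).foldl (fun res pq =>
        if PySem.Set.contains maskE pq.1 then res ++ List.replicate (pq.2 - pq.1) (-100)
        else res ++ (xs.drop pq.1).take (pq.2 - pq.1)) acc
      = (List.range xs.length).map (pvTarget ev xs) := by
  intro E
  induction E with
  | nil =>
    intro p acc hpw hbnd hmem hacc
    have hplen : p < xs.length := hbnd p (by simp)
    have hb : (ev p).isSome = true := (hmem p le_rfl hplen).mpr (by simp)
    have hnone1 : ∀ t, p < t → t < xs.length → ev t = none := by
      intro t ht1 ht2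
      by_contra hne
      have hs : (ev t).isSome = true := Option.ne_none_iff_isSome.mp hne
      have hmm := (hmem t (by omega) ht2).mp hs
      simp at hmm
      omega
    simp only [List.nil_append, List.zip_cons_cons, List.zip_nil_left, List.foldl_cons,
      List.foldl_nil]
    exact pvB_seg xs ev maskE hmask p xs.length hplen le_rfl hb hnone1 acc hacc
  | cons q rest ih =>
    intro p acc hpw hbnd hmem hacc
    have hpq : p < q := (List.pairwise_cons.mp hpw).1 q (by simp)
    have hqlen : q < xs.length := hbnd q (by simp)
    have hrest : ∀ e ∈ rest, q < e := (List.pairwise_cons.mp hpw.of_cons).1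
    have hnone1 : ∀ t, p < t → t < q → ev t = none := by
      intro t ht1 ht2
      by_contra hne
      have hs : (ev t).isSome = true := Option.ne_none_iff_isSome.mp hne
      have hmm := (hmem t (by omega) (by omega)).mp hs
      rcases List.mem_cons.mp hmm with h | hmm2
      · omega
      · rcases List.mem_cons.mp hmm2 with h | h
        · omega
        · have := hrest t h
          omega
    have hb : (ev p).isSome = true := (hmem p le_rfl (hbnd p (by simp))).mpr (by simp)
    have hseg := pvB_seg xs ev maskE hmask p q hpq (by omega) hb hnone1 acc hacc
    have hmem2 : ∀ i, q ≤ i → i < xs.length → ((ev i).isSome = true ↔ i ∈ q :: rest) := by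
      intro i hqi hilen
      rw [hmem i (by omega) hilen]
      constructor
      · intro h
        rcases List.mem_cons.mp h with h2 | h2
        · omega
        · exact h2
      · intro h
        exact List.mem_cons_of_mem _ h
    simp only [List.cons_append, List.zip_cons_cons, List.foldl_cons]
    exact ih q _ hpw.of_cons (fun e he => hbnd e (List.mem_cons_of_mem _ he)) hmem2 hseg

theorem pv_slice_imp (xs pat : List Int) (i : Nat) (hi : i ≤ xs.length)
    (h : PySem.List.slice xs (some (i : Int)) (some ((i : Int) + (pat.length : Int))) = pat) :
    i + pat.length ≤ xs.length := by
  rw [PySem.List.slice_natCast_add] at h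
  have hlen := congrArg List.length h
  simp only [List.length_take, List.length_drop] at hlen
  omega

theorem pv_starts_mem (xs pat : List Int) (i : Nat) :
    i ∈ pvStartsB xs pat ↔
      (i < xs.length ∧ PySem.List.slice xs (some (i : Int)) (some ((i : Int) + (pat.length : Int))) = pat) := by
  simp only [pvStartsB, List.mem_filter, List.mem_range, Bool.and_eq_true, decide_eq_true_eq,
    beq_iff_eq]
  constructor
  · rintro ⟨hi, -, hs⟩
    exact ⟨hi, hs⟩
  · rintro ⟨hi, hs⟩
    exact ⟨hi, pv_slice_imp xs pat i (by omega) hs, hs⟩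

theorem pv_cond_red (xs pat : List Int) (i : Nat) (hi : i < xs.length) :
    (i + pat.length ≤ xs.length ∧ PySem.List.slice xs (some (i : Int)) (some ((i : Int) + (pat.length : Int))) = pat)
      ↔ PySem.List.slice xs (some (i : Int)) (some ((i : Int) + (pat.length : Int))) = pat :=
  ⟨And.right, fun h => ⟨pv_slice_imp xs pat i (by omega) h, h⟩⟩

-- B's fold over the whole sorted event list produces the target labels
theorem pvB_core (xs : List Int) (ev : Nat → Option Bool) (maskE src : List Nat)
    (hmask : ∀ i, i < xs.length → (PySem.Set.contains maskE i = true ↔ ev i = some true))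
    (hnodup : src.Nodup)
    (hsrc : ∀ i : Nat, i ∈ src ↔ (i < xs.length ∧ (ev i).isSome = true)) :
    ((PySem.List.sorted src (fun x => x) false).zip
        ((PySem.List.sorted src (fun x => x) false).tail ++ [xs.length])).foldl
      (fun res pq =>
        if PySem.Set.contains maskE pq.1 then res ++ List.replicate (pq.2 - pq.1) (-100)
        else res ++ (xs.drop pq.1).take (pq.2 - pq.1))
      (match PySem.List.sorted src (fun x => x) false with
        | [] => xs
        | p :: _ => xs.take p)
    = (List.range xs.length).map (pvTarget ev xs) := by
  have hF : PySem.List.sorted src (fun x => x) false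
      = (List.range xs.length).filter (fun i => (ev i).isSome) := by
    apply PySem.List.sorted_eq_of_perm_of_pairwise_lt
    · rw [List.perm_ext_iff_of_nodup (List.Nodup.filter _ List.nodup_range) hnodup]
      intro a
      rw [hsrc a]
      simp [List.mem_filter]
    · exact List.Pairwise.filter _ List.pairwise_lt_range
  rw [hF]
  rcases hFc : (List.range xs.length).filter (fun i => (ev i).isSome) with _ | ⟨p, rest⟩
  · -- no events at all: every position keeps its value
    simp only [List.zip_nil_left, List.foldl_nil]
    have hnone : ∀ i, i < xs.length → ev i = none := by
      intro i hi
      by_contra hne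
      have hs : (ev i).isSome = true := Option.ne_none_iff_isSome.mp hne
      have : i ∈ (List.range xs.length).filter (fun i => (ev i).isSome) := by
        simp [List.mem_filter, hi, hs]
      rw [hFc] at this
      simp at this
    symm
    have : ∀ j ∈ List.range xs.length, pvTarget ev xs j = xs.getD j 0 := by
      intro j hj
      have hj' := List.mem_range.mp hj
      have : pvM ev j = false :=
        pvM_false_of_none_below ev j (fun t ht => hnone t (by omega))
      simp [pvTarget, this]
    rw [List.map_congr_left this, pv_map_getD_range]
  · -- at least one event: the prefix before the first event keeps its values,
    -- then pvB_fold walks the segments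
    have hmemF : ∀ i : Nat, i ∈ p :: rest ↔ (i < xs.length ∧ (ev i).isSome = true) := by
      intro i
      rw [← hFc]
      simp [List.mem_filter]
    have hpw : (p :: rest).Pairwise (· < ·) := by
      rw [← hFc]
      exact List.Pairwise.filter _ List.pairwise_lt_range
    have hbnd : ∀ e ∈ p :: rest, e < xs.length := fun e he => ((hmemF e).mp he).1
    have hplen : p < xs.length := hbnd p (by simp)
    have hlow : ∀ j, j < p → ev j = none := by
      intro j hj
      by_contra hne
      have hs : (ev j).isSome = true := Option.ne_none_iff_isSome.mp hne
      have hjF : j ∈ p :: rest := (hmemF j).mpr ⟨by omega, hs⟩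
      rcases List.mem_cons.mp hjF with h | h
      · omega
      · have := (List.pairwise_cons.mp hpw).1 j h
        omega
    have hacc : xs.take p = (List.range p).map (pvTarget ev xs) := by
      have : ∀ j ∈ List.range p, pvTarget ev xs j = xs.getD j 0 := by
        intro j hj
        have hj' := List.mem_range.mp hj
        have : pvM ev j = false :=
          pvM_false_of_none_below ev j (fun t ht => hlow t (by omega))
        simp [pvTarget, this]
      rw [List.map_congr_left this, pv_map_getD_range_take xs p (by omega)]
    have hmem : ∀ i, p ≤ i → i < xs.length → ((ev i).isSome = true ↔ i ∈ p :: rest) := by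
      intro i hpi hilen
      rw [hmemF i]
      simp [hilen]
    exact pvB_fold xs ev maskE hmask rest p (xs.take p) hpw hbnd hmem hacc

-- the two facts pvB_core needs, when there is no (truthy) system pattern
theorem pv_case_nosys (xs u m : List Int) (sp : Option (List Int))
    (hsysT : (match sp with | some l => !l.isEmpty | none => false) = false) :
    (∀ i, i < xs.length → ((PySem.Set.ofList (pvStartsB xs u)).contains i = true ↔ pvEv xs u m sp i = some true))
    ∧ (∀ i : Nat, i ∈ PySem.Set.union (PySem.Set.ofList (pvStartsB xs u)) (pvStartsB xs m)
        ↔ (i < xs.length ∧ (pvEv xs u m sp i).isSome = true)) := by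
  refine ⟨fun i hi => ?_, fun i => ?_⟩
  · rw [PySem.Set.contains_iff, PySem.Set.mem_ofList, pv_starts_mem]
    have e1 := pv_cond_red xs u i hi
    simp only [pvEv, hsysT, Bool.false_eq_true, false_and, if_false]
    split_ifs <;> simp_all
  · rw [PySem.Set.mem_union, PySem.Set.mem_ofList, pv_starts_mem, pv_starts_mem]
    by_cases hi : i < xs.length
    · have e1 := pv_cond_red xs u i hi
      have e2 := pv_cond_red xs m i hi
      simp only [pvEv, hsysT, Bool.false_eq_true, false_and, if_false]
      split_ifs <;> simp_all
    · simp [hi]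

-- the two facts pvB_core needs, for a truthy system pattern
theorem pv_case_sys (xs u m l : List Int) (hl : l.isEmpty = false) :
    (∀ i, i < xs.length → (((PySem.Set.ofList (pvStartsB xs u)).union (pvStartsB xs l)).contains i = true ↔ pvEv xs u m (some l) i = some true))
    ∧ (∀ i : Nat, i ∈ PySem.Set.union ((PySem.Set.ofList (pvStartsB xs u)).union (pvStartsB xs l)) (pvStartsB xs m)
        ↔ (i < xs.length ∧ (pvEv xs u m (some l) i).isSome = true)) := by
  refine ⟨fun i hi => ?_, fun i => ?_⟩
  · rw [PySem.Set.contains_iff, PySem.Set.mem_union, PySem.Set.mem_ofList, pv_starts_mem,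
      pv_starts_mem]
    have e1 := pv_cond_red xs u i hi
    have e3 := pv_cond_red xs l i hi
    simp only [pvEv, hl, Option.getD_some, Bool.not_false, true_and, if_true]
    split_ifs <;> simp_all
  · rw [PySem.Set.mem_union, PySem.Set.mem_union, PySem.Set.mem_ofList, pv_starts_mem,
      pv_starts_mem, pv_starts_mem]
    by_cases hi : i < xs.length
    · have e1 := pv_cond_red xs u i hi
      have e2 := pv_cond_red xs m i hi
      have e3 := pv_cond_red xs l i hi
      simp only [pvEv, hl, Option.getD_some, Bool.not_false, true_and, if_true]
      split_ifs <;> simp_all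
    · simp [hi]

-- ===== VERDICT (by name: the statement is the Claim_ definition above) =====
theorem mask_labels_py_spec : Claim_equal_mask_labels_py := by
  intro input_ids user_pat model_pat system_pat _
  unfold Spec_mask_labels_py mask_labels_py mask_labels_py_alt
  dsimp only
  rw [pvA_fold input_ids user_pat model_pat system_pat input_ids.length le_rfl]
  dsimp only
  have hA1 : (List.range input_ids.length).map (fun j =>
        if j < input_ids.length then pvTarget (pvEv input_ids user_pat model_pat system_pat) input_ids j
        else input_ids.getD j 0)
      = (List.range input_ids.length).map (pvTarget (pvEv input_ids user_pat model_pat system_pat) input_ids) := by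
    apply List.map_congr_left
    intro j hj
    simp [List.mem_range.mp hj]
  rw [hA1]
  rcases system_pat with _ | l
  · dsimp only
    obtain ⟨hmask, hsrc⟩ := pv_case_nosys input_ids user_pat model_pat none rfl
    rw [pvB_core input_ids (pvEv input_ids user_pat model_pat none) _ _ hmask
      (PySem.Set.nodup_union _ _ (PySem.Set.nodup_ofList _)) hsrc]
  · by_cases hl : l.isEmpty
    · have hsT : (!l.isEmpty) = false := by simp [hl]
      simp only [hsT, Bool.false_eq_true, if_false]
      obtain ⟨hmask, hsrc⟩ := pv_case_nosys input_ids user_pat model_pat (some l) (by simp [hl])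
      rw [pvB_core input_ids (pvEv input_ids user_pat model_pat (some l)) _ _ hmask
        (PySem.Set.nodup_union _ _ (PySem.Set.nodup_ofList _)) hsrc]
    · have hl' : l.isEmpty = false := by simp [hl]
      have hsT : (!l.isEmpty) = true := by simp [hl']
      simp only [hsT, if_true]
      obtain ⟨hmask, hsrc⟩ := pv_case_sys input_ids user_pat model_pat l hl'
      rw [pvB_core input_ids (pvEv input_ids user_pat model_pat (some l)) _ _ hmask
        (PySem.Set.nodup_union _ _ (PySem.Set.nodup_union _ _ (PySem.Set.nodup_ofList _))) hsrc]
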